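-- pv_equiv track=rewrite | github.com/larissavmss/PokemonCapturator | EP03.py | preenchePokemon
-- ===== SOURCE A (Python) =====
-- def preenchePokemon(matriz, id, x, y, raio):
--     '''
--     Esta função é auxiliar da função populaMatriz. Ela insere
--     um Pokémon na matriz de acordo com sua representação retangular
--     baseada no raio ao redor do ponto central (x,y)
--     Entrada: matriz representada por uma lista de listas
--              id é o número a preencher a matriz; para o
--              primeiro pokémon na lista (de índice zero),
--              usa-se 1 e assim subsequentemente.
--              x,y são as coordenadas do ponto central
--              raio é a distância a ser guardada a partir do
--              ponto central.
--     Saída: A matriz fornecida é modificada.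
--     '''
--     m, n = len(matriz), len(matriz[0])
--     r = raio
--
--     for i in range(m):
--         for j in range(n):
--             if (x - r) <= j <= (x + r) and (y - r) <= i <= (y + r):
--                 matriz[i][j] = id
--
--     return matriz
-- ===== SOURCE B (Python) =====
-- def preenchePokemon(matriz, id, x, y, raio):
--     m, n = len(matriz), len(matriz[0])
--     for i in range(max(0, y - raio), min(m, y + raio + 1)):
--         linha = matriz[i]
--         for j in range(max(0, x - raio), min(n, x + raio + 1)):
--             linha[j] = id
--     return matriz
-- ===== Notes on version B (the rewrite author's own statement) =====
-- stated objective: faster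
-- what changed: B iterates only over the rectangle's row/column ranges clamped to the matrix bounds instead of scanning every cell of the matrix and testing it against the rectangle.
import Mathlib
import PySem

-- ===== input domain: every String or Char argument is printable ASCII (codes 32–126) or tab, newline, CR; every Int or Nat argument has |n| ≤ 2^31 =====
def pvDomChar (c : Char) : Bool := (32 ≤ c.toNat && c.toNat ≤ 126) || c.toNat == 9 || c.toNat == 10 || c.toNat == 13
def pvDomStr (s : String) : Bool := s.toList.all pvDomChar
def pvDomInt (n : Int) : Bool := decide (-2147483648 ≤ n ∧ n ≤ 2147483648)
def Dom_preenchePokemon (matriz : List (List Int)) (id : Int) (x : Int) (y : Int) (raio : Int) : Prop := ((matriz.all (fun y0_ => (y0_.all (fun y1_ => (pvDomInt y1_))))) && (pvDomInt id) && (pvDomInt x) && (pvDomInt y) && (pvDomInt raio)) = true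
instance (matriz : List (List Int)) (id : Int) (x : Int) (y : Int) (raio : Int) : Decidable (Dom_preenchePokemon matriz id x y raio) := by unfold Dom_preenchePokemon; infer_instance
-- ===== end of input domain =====

-- B fills only the clamped rectangle instead of scanning every cell of the matrix (faster).
-- Both A and B mutate `matriz` in place in Python (same writes, same order); the equivalence proved here is about the return value.

-- ===== PORT A =====
-- Literal port of A: scan every cell (i,j), set matriz[i][j] = id when (i,j) lies in the rectangle.
-- `List.modify`/`List.set` are identity out of range, where Python raises IndexError (a too-short
-- ragged row); Pre_ excludes exactly those inputs, so the port is exact on Pre_.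
def preenchePokemon (matriz : List (List Int)) (id : Int) (x : Int) (y : Int) (raio : Int) : List (List Int) :=
  let m := matriz.length
  let n := matriz.headI.length
  let r := raio
  (List.range m).foldl (fun acc (i : Nat) =>
    (List.range n).foldl (fun acc2 (j : Nat) =>
      if (x - r) ≤ (j : Int) ∧ (j : Int) ≤ (x + r) ∧ (y - r) ≤ (i : Int) ∧ (i : Int) ≤ (y + r) then
        acc2.modify i (fun row => row.set j id)
      else acc2) acc) matriz


-- ===== PORT B =====
-- Literal port of Source B: iterate only over the clamped row range and the clamped column range.
def preenchePokemon_alt (matriz : List (List Int)) (id : Int) (x : Int) (y : Int) (raio : Int) : List (List Int) :=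
  let m := matriz.length
  let n := matriz.headI.length
  (PySem.List.pyRange (max 0 (y - raio)) (min (m : Int) (y + raio + 1)) 1).foldl (fun acc i =>
    (PySem.List.pyRange (max 0 (x - raio)) (min (n : Int) (x + raio + 1)) 1).foldl (fun acc2 j =>
      acc2.modify i.toNat (fun row => row.set j.toNat id)) acc) matriz


-- ===== PRECONDITION & SPEC =====
-- Pre_ excludes exactly the inputs where Python A raises IndexError: the empty matrix
-- (len(matriz[0]) fails) and ragged matrices where some rectangle cell (i,j) with i < m, j < n
-- falls beyond the end of row i.
def Pre_preenchePokemon (matriz : List (List Int)) (id : Int) (x : Int) (y : Int) (raio : Int) : Prop :=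
  matriz ≠ [] ∧
  ∀ i ∈ List.range matriz.length, ∀ j ∈ List.range matriz.headI.length,
    ((x - raio) ≤ (j : Int) ∧ (j : Int) ≤ (x + raio) ∧ (y - raio) ≤ (i : Int) ∧ (i : Int) ≤ (y + raio)) →
      j < (matriz.getD i []).length
instance (matriz : List (List Int)) (id : Int) (x : Int) (y : Int) (raio : Int) : Decidable (Pre_preenchePokemon matriz id x y raio) := by unfold Pre_preenchePokemon; infer_instance

def pvWitness_preenchePokemon : List (List Int) × Int × Int × Int × Int := ([[0, 0], [0, 0]], 7, 1, 0, 1)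

def Spec_preenchePokemon (matriz : List (List Int)) (id : Int) (x : Int) (y : Int) (raio : Int) (out : List (List Int)) : Prop := out = preenchePokemon_alt matriz id x y raio
instance (matriz : List (List Int)) (id : Int) (x : Int) (y : Int) (raio : Int) (out : List (List Int)) : Decidable (Spec_preenchePokemon matriz id x y raio out) := by unfold Spec_preenchePokemon; infer_instance

-- ===== CLAIM (what is proved, stated in full; the proofs are below) =====
def Claim_equal_preenchePokemon : Prop := ∀ (matriz : List (List Int)) (id : Int) (x : Int) (y : Int) (raio : Int), Dom_preenchePokemon matriz id x y raio → Pre_preenchePokemon matriz id x y raio → Spec_preenchePokemon matriz id x y raio (preenchePokemon matriz id x y raio)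

-- ===== LEMMAS AND PROOFS =====
-- (The two ports are in fact pointwise equal on every input; Pre_ marks where the Python A
-- returns at all, and the proof does not need it.)
-- helpers
theorem pv_set_getElem?_map {α : Type} (l : List α) (i j : Nat) (a : α) :
    (l.set i a)[j]? = l[j]?.map (fun v => if i = j then a else v) := by
  rw [List.getElem?_set]
  by_cases h : i = j
  · subst h
    by_cases hl : i < l.length
    · simp [hl]
    · simp [hl]
  · cases hv : l[j]? <;> simp [h]

theorem pv_modify_id {α : Type} (l : List α) (i : Nat) :
    l.modify i (fun a => a) = l := by
  apply List.ext_getElem?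
  intro t
  rw [List.getElem?_modify]
  cases l[t]? <;> simp

theorem pv_modify_modify {α : Type} (l : List α) (i : Nat) (f g : α → α) :
    (l.modify i f).modify i g = l.modify i (fun a => g (f a)) := by
  apply List.ext_getElem?
  intro t
  rw [List.getElem?_modify, List.getElem?_modify, List.getElem?_modify]
  cases l[t]? with
  | none => rfl
  | some v => by_cases h : i = t <;> simp [h]

-- A inner loop lifts out of the matrix
theorem pv_lift (idv : Int) (P : Nat → Prop) [DecidablePred P] :
    ∀ (js : List Nat) (acc : List (List Int)) (i : Nat),
    js.foldl (fun a j => if P j then a.modify i (fun row => row.set j idv) else a) acc =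
      acc.modify i (fun row => js.foldl (fun r j => if P j then r.set j idv else r) row) := by
  intro js
  induction js with
  | nil => intro acc i; simp [pv_modify_id]
  | cons j js ih =>
    intro acc i
    simp only [List.foldl_cons]
    by_cases h : P j
    · simp only [if_pos h]
      rw [ih, pv_modify_modify]
    · simp only [if_neg h]
      rw [ih]

-- B inner loop lifts out of the matrix
theorem pv_liftB (f : Int → List Int → List Int) :
    ∀ (js : List Int) (acc : List (List Int)) (i : Nat),
    js.foldl (fun a j => a.modify i (f j)) acc =
      acc.modify i (fun row => js.foldl (fun r j => f j r) row) := by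
  intro js
  induction js with
  | nil => intro acc i; simp [pv_modify_id]
  | cons j js ih =>
    intro acc i
    simp only [List.foldl_cons]
    rw [ih, pv_modify_modify]

-- A inner loop pointwise
theorem pv_fillA (idv : Int) (Q : Nat → Prop) [DecidablePred Q] :
    ∀ (n : Nat) (row : List Int) (t : Nat),
    ((List.range n).foldl (fun r j => if Q j then r.set j idv else r) row)[t]? =
      row[t]?.map (fun v => if t < n ∧ Q t then idv else v) := by
  intro n
  induction n with
  | zero => intro row t; cases h : row[t]? <;> simp [h]
  | succ n ih =>
    intro row t
    rw [List.range_succ, List.foldl_append]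
    simp only [List.foldl_cons, List.foldl_nil]
    by_cases hq : Q n
    · rw [if_pos hq, pv_set_getElem?_map, ih, Option.map_map]
      cases hv : row[t]? with
      | none => rfl
      | some v =>
        simp only [Option.map_some, Function.comp]
        by_cases h1 : n = t
        · subst h1; simp [hq]
        · have h2 : (t < n) ↔ (t < n + 1) := by omega
          simp [h1, h2]
    · rw [if_neg hq, ih]
      cases hv : row[t]? with
      | none => rfl
      | some v =>
        simp only [Option.map_some]
        by_cases h1 : t = n
        · subst h1; simp [hq]
        · have h2 : (t < n) ↔ (t < n + 1) := by omega
          simp [h2]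

-- A outer loop pointwise
theorem pv_outerA (G : Nat → List Int → List Int) :
    ∀ (m : Nat) (l : List (List Int)) (t : Nat),
    ((List.range m).foldl (fun acc i => acc.modify i (G i)) l)[t]? =
      l[t]?.map (fun row => if t < m then G t row else row) := by
  intro m
  induction m with
  | zero => intro l t; cases h : l[t]? <;> simp [h]
  | succ m ih =>
    intro l t
    rw [List.range_succ, List.foldl_append]
    simp only [List.foldl_cons, List.foldl_nil]
    rw [List.getElem?_modify, ih]
    cases hv : l[t]? with
    | none => rfl
    | some row =>
      simp only [Option.map_some, Option.map_eq_map]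
      by_cases h1 : m = t
      · subst h1; simp
      · have h2 : (t < m) ↔ (t < m + 1) := by omega
        simp [h1, h2]

-- B inner loop pointwise
theorem pv_fillB (idv : Int) (b : Int) :
    ∀ (n : Nat) (a : Int), 0 ≤ a → (b - a).toNat = n →
    ∀ (row : List Int) (t : Nat),
    ((PySem.List.pyRange a b 1).foldl (fun r j => r.set j.toNat idv) row)[t]? =
      row[t]?.map (fun v => if a ≤ (t : Int) ∧ (t : Int) < b then idv else v) := by
  intro n
  induction n with
  | zero =>
    intro a ha hn row t
    rw [PySem.List.pyRange_one_eq_nil (by omega)]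
    cases hv : row[t]? with
    | none => simp [hv]
    | some v => simp only [List.foldl_nil, hv, Option.map_some]; rw [if_neg (by omega)]
  | succ n ih =>
    intro a ha hn row t
    rw [PySem.List.pyRange_one_cons (by omega)]
    simp only [List.foldl_cons]
    rw [ih (a + 1) (by omega) (by omega), pv_set_getElem?_map, Option.map_map]
    cases hv : row[t]? with
    | none => rfl
    | some v =>
      simp only [Option.map_some, Function.comp]
      split_ifs <;> first | rfl | omega

-- B outer loop pointwise
theorem pv_outerB (H : List Int → List Int) (b : Int) :
    ∀ (n : Nat) (a : Int), 0 ≤ a → (b - a).toNat = n →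
    ∀ (l : List (List Int)) (t : Nat),
    ((PySem.List.pyRange a b 1).foldl (fun acc i => acc.modify i.toNat H) l)[t]? =
      l[t]?.map (fun row => if a ≤ (t : Int) ∧ (t : Int) < b then H row else row) := by
  intro n
  induction n with
  | zero =>
    intro a ha hn l t
    rw [PySem.List.pyRange_one_eq_nil (by omega)]
    cases hv : l[t]? with
    | none => simp [hv]
    | some row => simp only [List.foldl_nil, hv, Option.map_some]; rw [if_neg (by omega)]
  | succ n ih =>
    intro a ha hn l t
    rw [PySem.List.pyRange_one_cons (by omega)]
    simp only [List.foldl_cons]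
    rw [ih (a + 1) (by omega) (by omega), List.getElem?_modify]
    cases hv : l[t]? with
    | none => rfl
    | some row =>
      simp only [Option.map_some, Option.map_eq_map]
      split_ifs with h1 h2 <;> first | rfl | omega

theorem pv_main (matriz : List (List Int)) (id x y raio : Int) :
    preenchePokemon matriz id x y raio = preenchePokemon_alt matriz id x y raio := by
  unfold preenchePokemon preenchePokemon_alt
  simp only []
  set m := matriz.length with hm
  set n := matriz.headI.length with hn
  apply List.ext_getElem?
  intro t
  -- A side: lift the inner loop, then pointwise
  have hstep : (fun (acc : List (List Int)) (i : Nat) =>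
      (List.range n).foldl (fun acc2 (j : Nat) =>
        if (x - raio) ≤ (j : Int) ∧ (j : Int) ≤ (x + raio) ∧ (y - raio) ≤ (i : Int) ∧ (i : Int) ≤ (y + raio) then
          acc2.modify i (fun row => row.set j id)
        else acc2) acc)
      = (fun acc i => acc.modify i (fun row =>
          (List.range n).foldl (fun r (j : Nat) =>
            if (x - raio) ≤ (j : Int) ∧ (j : Int) ≤ (x + raio) ∧ (y - raio) ≤ (i : Int) ∧ (i : Int) ≤ (y + raio) then
              r.set j id else r) row)) := by
    funext acc i
    exact pv_lift id (fun j => (x - raio) ≤ (j : Int) ∧ (j : Int) ≤ (x + raio) ∧ (y - raio) ≤ (i : Int) ∧ (i : Int) ≤ (y + raio)) (List.range n) acc i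
  have hstepB : (fun (acc : List (List Int)) (i : Int) =>
      (PySem.List.pyRange (max 0 (x - raio)) (min (n : Int) (x + raio + 1)) 1).foldl (fun acc2 j =>
        acc2.modify i.toNat (fun row => row.set j.toNat id)) acc)
      = (fun acc i => acc.modify i.toNat (fun row =>
          (PySem.List.pyRange (max 0 (x - raio)) (min (n : Int) (x + raio + 1)) 1).foldl (fun r j =>
            r.set j.toNat id) row)) := by
    funext acc i
    exact pv_liftB (fun j row => row.set j.toNat id) _ acc i.toNat
  rw [hstep, pv_outerA, hstepB]
  rw [pv_outerB _ _ ((min (m : Int) (y + raio + 1)) - max 0 (y - raio)).toNat _ (by positivity) rfl]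
  cases hrow : matriz[t]? with
  | none => rfl
  | some row =>
    have ht : t < m := by
      by_contra h
      rw [List.getElem?_eq_none (by omega)] at hrow
      cases hrow
    simp only [Option.map_some]
    have hiff : (max 0 (y - raio) ≤ (t : Int) ∧ (t : Int) < min (m : Int) (y + raio + 1)) ↔
        ((y - raio) ≤ (t : Int) ∧ (t : Int) ≤ (y + raio)) := by omega
    by_cases hc : (y - raio) ≤ (t : Int) ∧ (t : Int) ≤ (y + raio)
    · rw [if_pos ht, if_pos (hiff.mpr hc)]
      congr 1
      apply List.ext_getElem?
      intro s
      rw [pv_fillA, pv_fillB id _ ((min (n : Int) (x + raio + 1)) - max 0 (x - raio)).toNat _ (by positivity) rfl]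
      cases hv : row[s]? with
      | none => rfl
      | some v =>
        simp only [Option.map_some]
        obtain ⟨hc1, hc2⟩ := hc
        split_ifs <;> first | rfl | omega
    · rw [if_pos ht, if_neg (fun hh => hc (hiff.mp hh))]
      congr 1
      apply List.ext_getElem?
      intro s
      rw [pv_fillA]
      cases hv : row[s]? with
      | none => rfl
      | some v =>
        simp only [Option.map_some]
        rw [if_neg (fun hh => hc ⟨hh.2.2.2.1, hh.2.2.2.2⟩)]

-- ===== VERDICT (by name: the statement is the Claim_ definition above) =====
theorem preenchePokemon_spec : Claim_equal_preenchePokemon := by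
  intro matriz id x y raio _ _
  unfold Spec_preenchePokemon
  exact pv_main matriz id x y raio
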